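-- pv_equiv track=rewrite | github.com/David-Tong/lintcode-in-python | 552-create maximum number/main.py | select_n_from_nums
-- ===== SOURCE A (Python) =====
-- def select_n_from_nums(nums, n):
--     if n == 0:
--         return list()
--
--     L = len(nums)
--     stack = list()
--     for idx, item in enumerate(nums):
--         while len(stack) > 0 and stack[-1] < item and len(stack) + L - idx > n:
--             stack.pop()
--         stack.append(item)
--     return stack[:n]
-- ===== SOURCE B (Python) =====
-- def select_n_from_nums(nums, n):
--     if n <= 0:
--         return []
--     L = len(nums)
--     if n >= L:
--         return list(nums)
--     result = []
--     start = 0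
--     for r in range(n, 0, -1):
--         window = nums[start : L - r + 1]
--         best = max(window)
--         start += window.index(best) + 1
--         result.append(best)
--     return result
-- ===== Notes on version B (the rewrite author's own statement) =====
-- stated objective: alternative
-- what changed: Replaced the one-pass monotonic-stack-with-pop-budget algorithm by per-slot greedy selection: for each of the n slots scan the feasible window for its leftmost maximum (max + index) and advance past it.
-- outside the precondition, e.g. on select_n_from_nums([3, 1, 2], -1): A returns [3], B returns []
import Mathlib
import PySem

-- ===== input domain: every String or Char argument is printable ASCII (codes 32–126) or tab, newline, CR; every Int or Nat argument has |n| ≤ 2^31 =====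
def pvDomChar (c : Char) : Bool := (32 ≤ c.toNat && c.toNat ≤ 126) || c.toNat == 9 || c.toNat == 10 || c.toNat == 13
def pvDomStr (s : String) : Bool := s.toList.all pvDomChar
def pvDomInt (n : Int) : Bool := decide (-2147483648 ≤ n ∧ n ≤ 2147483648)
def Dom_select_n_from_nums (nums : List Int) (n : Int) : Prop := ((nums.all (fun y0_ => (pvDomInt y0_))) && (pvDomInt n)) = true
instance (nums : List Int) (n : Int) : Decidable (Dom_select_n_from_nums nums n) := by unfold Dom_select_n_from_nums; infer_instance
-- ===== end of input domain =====

-- B replaces A's monotonic-stack pop loop by per-slot greedy leftmost-max window selection (alternative algorithm, similar cost).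

-- ===== PORT A =====
-- the inner 'while' loop of A: pop (drop the last element) while the guard holds
def aPopLoop (stack : List Int) (L n idx item : Int) : List Int :=
  if h : 0 < stack.length ∧ PySem.List.pyGetD stack (-1) 0 < item ∧ PySem.List.len stack + L - idx > n then
    aPopLoop stack.dropLast L n idx item
  else stack
termination_by stack.length
decreasing_by simp [List.length_dropLast]; omega

def select_n_from_nums (nums : List Int) (n : Int) : List Int :=
  if n = 0 then [] else
    let L := PySem.List.len nums
    let stack := (PySem.List.enumerate nums 0).foldl
      (fun stack p => aPopLoop stack L n p.1 p.2 ++ [p.2]) []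
    PySem.List.slice stack none (some n)

-- ===== PORT B =====
def select_n_from_nums_alt (nums : List Int) (n : Int) : List Int :=
  if n ≤ 0 then [] else
    let L := PySem.List.len nums
    if n ≥ L then nums else
      let fin := (PySem.List.pyRange n 0 (-1)).foldl
        (fun (acc : List Int × Int) r =>
          let window := PySem.List.slice nums (some acc.2) (some (L - r + 1))
          match PySem.List.max? window (fun y => y) with
          | none => acc
          | some best =>
            match PySem.List.index? window best with
            | none => acc
            | some j => (acc.1 ++ [best], acc.2 + (j : Int) + 1))
        ([], 0)
      fin.1

-- ===== PRECONDITION & SPEC =====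
-- Pre_ restricts to the natural domain of a count: negative n (where A returns a
-- negative-index slice of leftover stack state, e.g. A([3,1,2],-1) = [3]) is excluded.
def Pre_select_n_from_nums (nums : List Int) (n : Int) : Prop := 0 ≤ n
instance (nums : List Int) (n : Int) : Decidable (Pre_select_n_from_nums nums n) := by unfold Pre_select_n_from_nums; infer_instance
def pvWitness_select_n_from_nums : List Int × Int := ([2, 1, 3, 2], 2)

def Spec_select_n_from_nums (nums : List Int) (n : Int) (out : List Int) : Prop := out = select_n_from_nums_alt nums n
instance (nums : List Int) (n : Int) (out : List Int) : Decidable (Spec_select_n_from_nums nums n out) := by unfold Spec_select_n_from_nums; infer_instance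

-- ===== CLAIM (what is proved, stated in full; the proofs are below) =====
def Claim_equal_select_n_from_nums : Prop := ∀ (nums : List Int) (n : Int), Dom_select_n_from_nums nums n → Pre_select_n_from_nums nums n → Spec_select_n_from_nums nums n (select_n_from_nums nums n)

-- ===== LEMMAS AND PROOFS =====

def popW : List Int → Nat → Int → List Int × Nat
  | [], k, _ => ([], k)
  | a :: s, k, x => if a < x ∧ 0 < k then popW s (k - 1) x else (a :: s, k)
def runW : List Int → Nat → List Int → List Int × Nat
  | s, k, [] => (s, k)
  | s, k, x :: xs => runW (x :: (popW s k x).1) (popW s k x).2 xs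

lemma popW_conserv (x : Int) : ∀ (s : List Int) (k : Nat),
    (((popW s k x).2 : Int)) = (k : Int) - s.length + (popW s k x).1.length := by
  intro s
  induction s with
  | nil => intro k; simp [popW]
  | cons a s ih =>
    intro k
    by_cases h : a < x ∧ 0 < k
    · simp only [popW, if_pos h]
      have := ih (k - 1)
      have hk1 : ((k - 1 : Nat) : Int) = (k : Int) - 1 := by omega
      rw [hk1] at this
      push_cast [List.length_cons] at this ⊢
      omega
    · simp [popW, if_neg h]

lemma popW_mem (x y : Int) : ∀ (s : List Int) (k : Nat), y ∈ (popW s k x).1 → y ∈ s := by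
  intro s
  induction s with
  | nil => intro k; simp [popW]
  | cons a s ih =>
    intro k
    by_cases h : a < x ∧ 0 < k
    · simp only [popW, if_pos h]
      intro hy
      exact List.mem_cons_of_mem _ (ih _ hy)
    · simp [popW, if_neg h]

lemma popW_append (x b : Int) : ∀ (s : List Int) (k : Nat),
    popW (s ++ [b]) k x =
      if b < x ∧ (popW s k x).1 = [] ∧ 0 < (popW s k x).2 then ([], (popW s k x).2 - 1)
      else ((popW s k x).1 ++ [b], (popW s k x).2) := by
  intro s
  induction s with
  | nil =>
    intro k
    by_cases hb : b < x
    · by_cases hk : 0 < k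
      · simp [popW, hb, hk]
      · simp [popW, hb, hk]
    · simp [popW, hb]
  | cons a s ih =>
    intro k
    by_cases h : a < x ∧ 0 < k
    · simp only [List.cons_append, popW, if_pos h, ih]
    · simp only [List.cons_append, popW, if_neg h]
      rw [if_neg (by simp [popW, if_neg h])]

lemma popW_all_lt (x : Int) : ∀ (s : List Int) (k : Nat),
    (∀ y ∈ s, y < x) → s.length ≤ k → popW s k x = ([], k - s.length) := by
  intro s
  induction s with
  | nil => intro k _ _; simp [popW]
  | cons a s ih =>
    intro k hlt hk
    simp only [List.length_cons] at hk
    have h : a < x ∧ 0 < k := ⟨hlt a (by simp), by omega⟩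
    simp only [popW, if_pos h]
    rw [ih (k-1) (fun y hy => hlt y (by simp [hy])) (by omega)]
    congr 1
    simp only [List.length_cons]
    omega

lemma runW_append (as bs : List Int) : ∀ (s : List Int) (k : Nat),
    runW s k (as ++ bs) = runW (runW s k as).1 (runW s k as).2 bs := by
  induction as with
  | nil => intro s k; simp [runW]
  | cons a as ih => intro s k; simp only [List.cons_append, runW]; exact ih _ _

lemma runW_conserv : ∀ (as s : List Int) (k : Nat),
    (((runW s k as).2 : Int)) = (k : Int) - s.length - as.length + (runW s k as).1.length := by
  intro as
  induction as with
  | nil => intro s k; simp [runW]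
  | cons a as ih =>
    intro s k
    simp only [runW, List.length_cons]
    rw [ih]
    have := popW_conserv a s k
    simp only [List.length_cons]
    push_cast at this ⊢
    omega

lemma runW_mem (y : Int) : ∀ (as s : List Int) (k : Nat),
    y ∈ (runW s k as).1 → y ∈ s ∨ y ∈ as := by
  intro as
  induction as with
  | nil => intro s k h; simp [runW] at h; exact Or.inl h
  | cons a as ih =>
    intro s k h
    rcases ih _ _ h with h1 | h1
    · rcases List.mem_cons.mp h1 with rfl | h2
      · simp
      · exact Or.inl (popW_mem a y s k h2)
    · simp [h1]

lemma runW_floor (b : Int) : ∀ (as s : List Int) (k : Nat),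
    (∀ (i : Nat) (h : i < as.length), i + s.length + 1 ≤ k → as[i] ≤ b) →
    runW (s ++ [b]) k as = ((runW s k as).1 ++ [b], (runW s k as).2) := by
  intro as
  induction as with
  | nil => intro s k _; simp [runW]
  | cons a as ih =>
    intro s k hyp
    have hcons := popW_conserv a s k
    simp only [runW]
    rw [popW_append a b s k]
    have hcond : ¬ (b < a ∧ (popW s k a).1 = [] ∧ 0 < (popW s k a).2) := by
      rintro ⟨hba, hnil, hpos⟩
      rw [hnil] at hcons
      have h0 : (0:Nat) + s.length + 1 ≤ k := by
        simp only [List.length_nil] at hcons; omega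
      have := hyp 0 (by simp) h0
      simp only [List.getElem_cons_zero] at this
      omega
    rw [if_neg hcond]
    have hstep : (a :: ((popW s k a).1 ++ [b])) = (a :: (popW s k a).1) ++ [b] := by simp
    rw [hstep]
    rw [ih (a :: (popW s k a).1) (popW s k a).2 ?_]
    intro i hi hle
    have := hyp (i + 1) (by simpa using Nat.succ_lt_succ hi) ?_
    · simpa using this
    · simp only [List.length_cons] at hle
      push_cast at hcons
      omega

lemma popBridge (L n idx x : Int) : ∀ (r : List Int) (k : Nat),
    (k : Int) = L - n - idx + r.length →
    aPopLoop r.reverse L n idx x = ((popW r k x).1).reverse := by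
  intro r
  induction r with
  | nil =>
    intro k _
    rw [aPopLoop]
    simp [popW]
  | cons a r' ih =>
    intro k hk
    simp only [List.length_cons] at hk
    rw [aPopLoop]
    simp only [List.reverse_cons]
    by_cases h : a < x ∧ 0 < k
    · rw [dif_pos ?_]
      · rw [List.dropLast_concat]
        have hk' : ((k - 1 : Nat) : Int) = L - n - idx + r'.length := by omega
        rw [ih (k - 1) hk']
        simp only [popW, if_pos h]
      · refine ⟨by simp, ?_, ?_⟩
        · rw [PySem.List.pyGetD_neg_one_append_singleton]; exact h.1
        · simp only [PySem.List.len_eq, List.length_append, List.length_reverse,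
            List.length_cons, List.length_nil]
          push_cast
          omega
    · rw [dif_neg ?_]
      · simp only [popW, if_neg h, List.reverse_cons]
      · rintro ⟨-, hlt, hbig⟩
        rw [PySem.List.pyGetD_neg_one_append_singleton] at hlt
        simp only [PySem.List.len_eq, List.length_append, List.length_reverse,
          List.length_cons, List.length_nil] at hbig
        push_cast at hbig
        exact h ⟨hlt, by omega⟩

lemma foldBridgeMain (L n : Int) : ∀ (ys s : List Int) (k : Nat) (idx : Int),
    (k : Int) = L - n - idx + s.length →
    (PySem.List.enumerate ys idx).foldl
      (fun stack p => aPopLoop stack L n p.1 p.2 ++ [p.2]) s.reverse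
    = ((runW s k ys).1).reverse := by
  intro ys
  induction ys with
  | nil => intro s k idx _; simp [PySem.List.enumerate, runW]
  | cons x ys ih =>
    intro s k idx hk
    rw [PySem.List.enumerate_cons]
    simp only [List.foldl_cons]
    rw [popBridge L n idx x s k hk]
    have hrw : ((popW s k x).1).reverse ++ [x] = (x :: (popW s k x).1).reverse := by simp
    rw [hrw]
    rw [ih (x :: (popW s k x).1) (popW s k x).2 (idx + 1) ?_]
    · simp only [runW]
    · have := popW_conserv x s k
      simp only [List.length_cons]
      push_cast at this ⊢
      omega

lemma aPopLoop_stop (s : List Int) (L n idx x : Int)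
    (h : ¬ ((s.length : Int) + L - idx > n)) : aPopLoop s L n idx x = s := by
  rw [aPopLoop]
  rw [dif_neg]
  rintro ⟨-, -, hbig⟩
  simp only [PySem.List.len_eq] at hbig
  exact h hbig

lemma noPopFold (L n : Int) : ∀ (ys s : List Int) (idx : Int),
    (s.length : Int) + L - idx ≤ n →
    (PySem.List.enumerate ys idx).foldl
      (fun stack p => aPopLoop stack L n p.1 p.2 ++ [p.2]) s = s ++ ys := by
  intro ys
  induction ys with
  | nil => intro s idx _; simp [PySem.List.enumerate]
  | cons x ys ih =>
    intro s idx hle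
    rw [PySem.List.enumerate_cons]
    simp only [List.foldl_cons]
    rw [aPopLoop_stop s L n idx x (by omega)]
    rw [ih (s ++ [x]) (idx + 1) (by simp; push_cast; omega)]
    simp

def gRec : Nat → List Int → List Int
  | 0, _ => []
  | (r + 1), xs =>
    let w := xs.take (xs.length - r)
    match PySem.List.max? w (fun y => y) with
    | none => []
    | some m =>
      match PySem.List.index? w m with
      | none => []
      | some j => m :: gRec r (xs.drop (j + 1))

lemma mainEquiv : ∀ (r : Nat) (xs : List Int), 0 < r → r ≤ xs.length →
    (((runW [] (xs.length - r) xs).1.reverse).take r) = gRec r xs := by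
  intro r
  induction r with
  | zero => intro xs h; omega
  | succ r' ih =>
    intro xs _ h2
    set k := xs.length - (r' + 1) with hkdef
    have hw : xs.length - r' = k + 1 := by omega
    set w := xs.take (xs.length - r') with hwdef
    have hwlen : w.length = k + 1 := by
      rw [hwdef, List.length_take, hw]; omega
    have hwne : w ≠ [] := by
      intro hc; rw [hc] at hwlen; simp at hwlen
    obtain ⟨m, hm⟩ : ∃ m, PySem.List.max? w (fun y => y) = some m := by
      rcases hx : PySem.List.max? w (fun y => y) with _ | m
      · exact absurd ((PySem.List.max?_eq_none_iff w (fun y => y)).mp hx) hwne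
      · exact ⟨m, rfl⟩
    have hmem : m ∈ w := PySem.List.max?_mem hm
    obtain ⟨j, hj⟩ : ∃ j, PySem.List.index? w m = some j := by
      rcases hx : PySem.List.index? w m with _ | j
      · exact absurd hmem ((PySem.List.index?_eq_none_iff w m).mp hx)
      · exact ⟨j, rfl⟩
    obtain ⟨hjlt, hwj, hbefore⟩ := PySem.List.getElem_of_index?_eq_some hj
    have hmax : ∀ y ∈ w, y ≤ m := fun y hy => PySem.List.max?_isMax hm y hy
    have hjk : j ≤ k := by omega
    have hjlen : j < xs.length := by omega
    have hxj : xs[j] = m := by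
      rw [← hwj]
      simp only [hwdef]
      exact List.getElem_take.symm
    -- elements of w at indices < k+1 are xs's
    have hwidx : ∀ (i : Nat) (hi : i < k + 1) (hix : i < xs.length), w[i]'(by omega) = xs[i] := by
      intro i hi hix
      simp only [hwdef]
      exact List.getElem_take
    -- decompose xs
    have hx : xs = xs.take j ++ (m :: xs.drop (j + 1)) := by
      conv_lhs => rw [← List.take_append_drop j xs]
      congr 1
      rw [← List.getElem_cons_drop hjlen, hxj]
    have e1 : runW [] k xs
        = runW (runW [] k (xs.take j)).1 (runW [] k (xs.take j)).2 (m :: xs.drop (j + 1)) := by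
      conv_lhs => rw [hx]
      exact runW_append _ _ _ _
    set s₁ := (runW [] k (xs.take j)).1 with hs₁
    set k₁ := (runW [] k (xs.take j)).2 with hk₁
    have hjtake : (xs.take j).length = j := by
      rw [List.length_take]; omega
    have hcons := runW_conserv (xs.take j) [] k
    rw [← hs₁, ← hk₁, hjtake] at hcons
    simp only [List.length_nil] at hcons
    have hs₁lt : ∀ y ∈ s₁, y < m := by
      intro y hy
      rcases runW_mem y (xs.take j) [] k (by rw [← hs₁]; exact hy) with hc | hc
      · simp at hc
      · obtain ⟨i, hi, hiy⟩ := List.mem_iff_getElem.mp hc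
        rw [List.length_take] at hi
        have hij : i < j := by omega
        rw [List.getElem_take] at hiy
        have hiw : xs[i]'(by omega) = w[i]'(by omega) := (hwidx i (by omega) (by omega)).symm
        have hne : w[i]'(by omega) ≠ m := hbefore i (by omega)
        have hle : w[i]'(by omega) ≤ m := hmax _ (List.getElem_mem _)
        rw [← hiy, hiw]
        omega
    have hs₁k₁ : s₁.length ≤ k₁ := by omega
    have hpop : popW s₁ k₁ m = ([], k₁ - s₁.length) := popW_all_lt m s₁ k₁ hs₁lt hs₁k₁
    have hkj : k₁ - s₁.length = k - j := by omega
    have e2 : runW [] k xs = runW ([] ++ [m]) (k - j) (xs.drop (j + 1)) := by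
      rw [e1]
      simp only [runW, ← hs₁, ← hk₁, hpop, hkj]
      rfl
    have hfloor : runW ([] ++ [m]) (k - j) (xs.drop (j + 1))
        = ((runW [] (k - j) (xs.drop (j + 1))).1 ++ [m], (runW [] (k - j) (xs.drop (j + 1))).2) := by
      apply runW_floor
      intro i hi hle
      rw [List.getElem_drop]
      simp only [List.length_nil] at hle
      have hik : j + 1 + i < k + 1 := by omega
      have hixs : j + 1 + i < xs.length := by rw [List.length_drop] at hi; omega
      rw [← hwidx (j + 1 + i) hik hixs]
      exact hmax _ (List.getElem_mem _)
    have e3 : (runW [] k xs).1.reverse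
        = m :: (runW [] (k - j) (xs.drop (j + 1))).1.reverse := by
      rw [e2, hfloor]
      simp
    rw [e3]
    have hg : gRec (r' + 1) xs = m :: gRec r' (xs.drop (j + 1)) := by
      simp only [gRec, ← hwdef, hm, hj]
    rw [hg, List.take_succ_cons]
    congr 1
    rcases Nat.eq_zero_or_pos r' with hr0 | hrpos
    · subst hr0; simp [gRec]
    · have hdl : (xs.drop (j + 1)).length = xs.length - (j + 1) := List.length_drop ..
      have hr'le : r' ≤ (xs.drop (j + 1)).length := by omega
      have := ih (xs.drop (j + 1)) hrpos hr'le
      have hkeq : (xs.drop (j + 1)).length - r' = k - j := by rw [hdl]; omega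
      rw [hkeq] at this
      exact this

lemma bBridgeMain (nums : List Int) : ∀ (r : Nat) (res : List Int) (start : Nat),
    start + r ≤ nums.length →
    ((PySem.List.pyRange (r : Int) 0 (-1)).foldl
      (fun (acc : List Int × Int) rr =>
        let window := PySem.List.slice nums (some acc.2) (some (PySem.List.len nums - rr + 1))
        match PySem.List.max? window (fun y => y) with
        | none => acc
        | some best =>
          match PySem.List.index? window best with
          | none => acc
          | some j => (acc.1 ++ [best], acc.2 + (j : Int) + 1))
      (res, (start : Int))).1 = res ++ gRec r (nums.drop start) := by
  intro r
  induction r with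
  | zero =>
    intro res start _
    rw [PySem.List.pyRange_neg_one_eq_nil (by norm_num)]
    simp [gRec]
  | succ r' ih =>
    intro res start hle
    rw [PySem.List.pyRange_neg_one_cons (by positivity)]
    rw [List.foldl_cons]
    have hcast : ((r' + 1 : Nat) : Int) - 1 = ((r' : Nat) : Int) := by push_cast; ring
    rw [hcast]
    -- identify the window with gRec's
    have hwin : PySem.List.slice nums (some ((start : Nat) : Int))
          (some (PySem.List.len nums - ((r' + 1 : Nat) : Int) + 1))
        = (nums.drop start).take ((nums.drop start).length - r') := by
      rw [PySem.List.len_eq]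
      rw [PySem.List.slice_toNat _ (by positivity) (by push_cast; omega)]
      congr 1
      rw [List.length_drop]
      push_cast
      omega
    simp only [hwin]
    set w := (nums.drop start).take ((nums.drop start).length - r') with hwdef
    have hdlen : (nums.drop start).length = nums.length - start := List.length_drop ..
    have hwlen : w.length = nums.length - start - r' := by
      rw [hwdef, List.length_take, hdlen]; omega
    have hwne : w ≠ [] := by
      intro hc; rw [hc] at hwlen; simp at hwlen; omega
    obtain ⟨m, hm⟩ : ∃ m, PySem.List.max? w (fun y => y) = some m := by
      rcases hx : PySem.List.max? w (fun y => y) with _ | m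
      · exact absurd ((PySem.List.max?_eq_none_iff w (fun y => y)).mp hx) hwne
      · exact ⟨m, rfl⟩
    obtain ⟨j, hj⟩ : ∃ j, PySem.List.index? w m = some j := by
      rcases hx : PySem.List.index? w m with _ | j
      · exact absurd (PySem.List.max?_mem hm) ((PySem.List.index?_eq_none_iff w m).mp hx)
      · exact ⟨j, rfl⟩
    obtain ⟨hjlt, -, -⟩ := PySem.List.getElem_of_index?_eq_some hj
    simp only [hm, hj]
    have hc2 : ((start : Nat) : Int) + (j : Int) + 1 = ((start + j + 1 : Nat) : Int) := by
      push_cast; ring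
    rw [hc2]
    rw [ih (res ++ [m]) (start + j + 1) (by rw [hwlen] at hjlt; omega)]
    have hdd : (nums.drop start).drop (j + 1) = nums.drop (start + j + 1) := by
      rw [List.drop_drop, show start + (j + 1) = start + j + 1 from by omega]
    have hg : gRec (r' + 1) (nums.drop start) = m :: gRec r' (nums.drop (start + j + 1)) := by
      simp only [gRec, ← hwdef, hm, hj, hdd]
    rw [hg]
    simp

lemma final : ∀ (nums : List Int) (n : Int), 0 ≤ n →
    select_n_from_nums nums n = select_n_from_nums_alt nums n := by
  intro nums n hpre
  rcases eq_or_lt_of_le hpre with h0 | hpos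
  · have hn0 : n = 0 := h0.symm
    subst hn0
    simp [select_n_from_nums, select_n_from_nums_alt]
  · rw [select_n_from_nums, select_n_from_nums_alt, if_neg (by omega), if_neg (by omega)]
    show PySem.List.slice
        ((PySem.List.enumerate nums 0).foldl
          (fun stack p => aPopLoop stack ((nums.length : Nat) : Int) n p.1 p.2 ++ [p.2]) [])
        none (some n)
      = (if n ≥ PySem.List.len nums then nums else
          ((PySem.List.pyRange n 0 (-1)).foldl
            (fun (acc : List Int × Int) rr =>
              match PySem.List.max? (PySem.List.slice nums (some acc.2) (some (PySem.List.len nums - rr + 1))) (fun y => y) with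
              | none => acc
              | some best =>
                match PySem.List.index? (PySem.List.slice nums (some acc.2) (some (PySem.List.len nums - rr + 1))) best with
                | none => acc
                | some j => (acc.1 ++ [best], acc.2 + (j : Int) + 1))
            ([], 0)).1)
    by_cases hn : n ≥ (nums.length : Int)
    · rw [if_pos (show n ≥ PySem.List.len nums by simpa [PySem.List.len_eq] using hn)]
      have := noPopFold (nums.length : Int) n nums [] 0 (by simp; omega)
      simp only [List.nil_append] at this
      rw [this]
      rw [PySem.List.slice_to _ (by omega)]
      exact List.take_of_length_le (by omega)
    · rw [if_neg (show ¬ n ≥ PySem.List.len nums by simpa [PySem.List.len_eq] using hn)]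
      push_neg at hn
      set r : Nat := n.toNat with hrdef
      have hrn : ((r : Nat) : Int) = n := Int.toNat_of_nonneg hpre
      have hrlen : r ≤ nums.length := by omega
      have hrpos : 0 < r := by omega
      have hbridge := foldBridgeMain (nums.length : Int) n nums [] (nums.length - r) 0
        (by simp; omega)
      simp only [List.reverse_nil] at hbridge
      rw [hbridge]
      rw [PySem.List.slice_to _ (by omega)]
      have hA := mainEquiv r nums hrpos hrlen
      rw [hA]
      have hB := bBridgeMain nums r [] 0 (by omega)
      rw [hrn] at hB
      simp only [Nat.cast_zero, List.drop_zero, List.nil_append] at hB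
      rw [hB]

-- ===== VERDICT (by name: the statement is the Claim_ definition above) =====
theorem select_n_from_nums_spec : Claim_equal_select_n_from_nums := by
  intro nums n _ hpre
  exact final nums n hpre
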